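-- pv_equiv track=rewrite | github.com/xalfoxmiss/pricing-analysis-panel | pricing_analyzer.py | _infer_category_from_title
-- ===== SOURCE A (Python) =====
-- def _infer_category_from_title(title: str) -> str:
--     """Infiere categoría del título del producto"""
--     title_lower = title.lower()
--
--     if any(word in title_lower for word in ['turismo', 'touring', 'passenger']):
--         return 'turismo'
--     elif any(word in title_lower for word in ['4x4', 'suv', '4x2', 'off-road', 'all terrain']):
--         return '4x4'
--     elif any(word in title_lower for word in ['furgoneta', 'van', 'camion', 'cargo']):
--         return 'furgoneta'
--     elif any(word in title_lower for word in ['moto', 'motorcycle']):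
--         return 'moto'
--     else:
--         return 'otro'
-- ===== SOURCE B (Python) =====
-- _KEYWORD_PRIORITY = {
--     'turismo': 0, 'touring': 0, 'passenger': 0,
--     '4x4': 1, 'suv': 1, '4x2': 1, 'off-road': 1, 'all terrain': 1,
--     'furgoneta': 2, 'van': 2, 'camion': 2, 'cargo': 2,
--     'moto': 3, 'motorcycle': 3,
-- }
-- _NAMES = ['turismo', '4x4', 'furgoneta', 'moto']
--
-- def _infer_category_from_title(title: str) -> str:
--     """Infiere categoría del título del producto"""
--     t = title.lower()
--     best = min((p for w, p in _KEYWORD_PRIORITY.items() if w in t), default=None)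
--     return 'otro' if best is None else _NAMES[best]
-- ===== Notes on version B (the rewrite author's own statement) =====
-- stated objective: alternative
-- what changed: B flattens the four branches into one keyword-to-priority map, scans ALL keywords collecting the minimum matched priority (no early exit per category), and maps that priority back to the category name, instead of A's ordered if/elif first-match chain.
import Mathlib
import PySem

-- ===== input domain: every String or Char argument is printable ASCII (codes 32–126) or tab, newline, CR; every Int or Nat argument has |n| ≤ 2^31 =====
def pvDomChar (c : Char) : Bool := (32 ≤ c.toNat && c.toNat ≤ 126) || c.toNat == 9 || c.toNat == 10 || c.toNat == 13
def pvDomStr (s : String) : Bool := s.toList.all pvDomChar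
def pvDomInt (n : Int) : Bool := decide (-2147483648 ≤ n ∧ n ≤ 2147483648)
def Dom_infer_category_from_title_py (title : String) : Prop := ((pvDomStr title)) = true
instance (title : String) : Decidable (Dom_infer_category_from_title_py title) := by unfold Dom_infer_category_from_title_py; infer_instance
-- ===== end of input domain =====

-- B replaces A's ordered if/elif first-match chain by a flat keyword→priority map: it scans ALL
-- keywords, takes the minimum matched priority and maps it back to a name (alternative; same cost).
-- ===== PORT A =====
def infer_category_from_title_py (title : String) : String :=
  let title_lower := PySem.Str.lower title
  if (["turismo", "touring", "passenger"].any fun word => PySem.Str.isIn word title_lower) then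
    "turismo"
  else if (["4x4", "suv", "4x2", "off-road", "all terrain"].any fun word => PySem.Str.isIn word title_lower) then
    "4x4"
  else if (["furgoneta", "van", "camion", "cargo"].any fun word => PySem.Str.isIn word title_lower) then
    "furgoneta"
  else if (["moto", "motorcycle"].any fun word => PySem.Str.isIn word title_lower) then
    "moto"
  else
    "otro"

-- ===== PORT B =====
-- the dict _KEYWORD_PRIORITY of Source B, in insertion order
def pvKeywordPriority : List (String × Nat) :=
  [("turismo", 0), ("touring", 0), ("passenger", 0),
   ("4x4", 1), ("suv", 1), ("4x2", 1), ("off-road", 1), ("all terrain", 1),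
   ("furgoneta", 2), ("van", 2), ("camion", 2), ("cargo", 2),
   ("moto", 3), ("motorcycle", 3)]

def pvNames : List String := ["turismo", "4x4", "furgoneta", "moto"]

-- min((p for w, p in items if w in t), default=None): a fold over all items keeping the least matched priority
def pvBest (t : String) : Option Nat :=
  pvKeywordPriority.foldl
    (fun acc wp =>
      if PySem.Str.isIn wp.1 t then some (min (acc.getD wp.2) wp.2)
      else acc)
    none

def infer_category_from_title_py_alt (title : String) : String :=
  (pvBest (PySem.Str.lower title)).elim "otro" (fun p => pvNames.getD p "otro")

-- ===== PRECONDITION & SPEC =====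
def Spec_infer_category_from_title_py (title : String) (out : String) : Prop := out = infer_category_from_title_py_alt title
instance (title : String) (out : String) : Decidable (Spec_infer_category_from_title_py title out) := by unfold Spec_infer_category_from_title_py; infer_instance

-- ===== CLAIM =====
def Claim_equal_infer_category_from_title_py : Prop := ∀ (title : String), Dom_infer_category_from_title_py title → Spec_infer_category_from_title_py title (infer_category_from_title_py title)

-- ===== LEMMAS AND PROOFS =====
set_option maxHeartbeats 2000000

-- the two programs' selections (priority index chosen), abstracted over the 14 substring tests
def pvChainIdx (b1 b2 b3 b4 b5 b6 b7 b8 b9 b10 b11 b12 b13 b14 : Bool) : Option Nat :=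
  if ([b1, b2, b3].any id) then some 0
  else if ([b4, b5, b6, b7, b8].any id) then some 1
  else if ([b9, b10, b11, b12].any id) then some 2
  else if ([b13, b14].any id) then some 3
  else none

def pvMinIdx (b1 b2 b3 b4 b5 b6 b7 b8 b9 b10 b11 b12 b13 b14 : Bool) : Option Nat :=
  ([(b1, 0), (b2, 0), (b3, 0), (b4, 1), (b5, 1), (b6, 1), (b7, 1), (b8, 1),
    (b9, 2), (b10, 2), (b11, 2), (b12, 2), (b13, 3), (b14, 3)] : List (Bool × Nat)).foldl
    (fun acc bp => if bp.1 then some (min (acc.getD bp.2) bp.2) else acc) none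

theorem pv_idx_eq : ∀ b1 b2 b3 b4 b5 b6 b7 b8 b9 b10 b11 b12 b13 b14 : Bool,
    pvChainIdx b1 b2 b3 b4 b5 b6 b7 b8 b9 b10 b11 b12 b13 b14 =
    pvMinIdx b1 b2 b3 b4 b5 b6 b7 b8 b9 b10 b11 b12 b13 b14 := by decide

theorem pv_shape_eq (b1 b2 b3 b4 b5 b6 b7 b8 b9 b10 b11 b12 b13 b14 : Bool) :
    (if ([b1, b2, b3].any id) then "turismo"
     else if ([b4, b5, b6, b7, b8].any id) then "4x4"
     else if ([b9, b10, b11, b12].any id) then "furgoneta"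
     else if ([b13, b14].any id) then "moto"
     else "otro") =
    (pvMinIdx b1 b2 b3 b4 b5 b6 b7 b8 b9 b10 b11 b12 b13 b14).elim
      "otro" (fun p => pvNames.getD p "otro") := by
  rw [← pv_idx_eq]
  unfold pvChainIdx
  split_ifs <;> rfl

-- ===== VERDICT =====
theorem infer_category_from_title_py_spec : Claim_equal_infer_category_from_title_py := by
  intro title _
  unfold Spec_infer_category_from_title_py
  have h := pv_shape_eq
    (PySem.Str.isIn "turismo" (PySem.Str.lower title)) (PySem.Str.isIn "touring" (PySem.Str.lower title))
    (PySem.Str.isIn "passenger" (PySem.Str.lower title)) (PySem.Str.isIn "4x4" (PySem.Str.lower title))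
    (PySem.Str.isIn "suv" (PySem.Str.lower title)) (PySem.Str.isIn "4x2" (PySem.Str.lower title))
    (PySem.Str.isIn "off-road" (PySem.Str.lower title)) (PySem.Str.isIn "all terrain" (PySem.Str.lower title))
    (PySem.Str.isIn "furgoneta" (PySem.Str.lower title)) (PySem.Str.isIn "van" (PySem.Str.lower title))
    (PySem.Str.isIn "camion" (PySem.Str.lower title)) (PySem.Str.isIn "cargo" (PySem.Str.lower title))
    (PySem.Str.isIn "moto" (PySem.Str.lower title)) (PySem.Str.isIn "motorcycle" (PySem.Str.lower title))
  simp only [infer_category_from_title_py, infer_category_from_title_py_alt, pvBest,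
    pvKeywordPriority, pvMinIdx, List.foldl, List.any_cons, List.any_nil, id_eq,
    Bool.or_false] at h ⊢
  exact h
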